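-- pv_equiv track=rewrite | github.com/DaveRoox/AdventOfCode | 2020/day04.py | fold_multiline
-- ===== SOURCE A (Python) =====
-- def fold_multiline(v):
--     nv, t = [], ''
--     for p in v:
--         if not p:
--             if t:
--                 nv.append(t)
--                 t = ''
--         else:
--             if t:
--                 t += ' ' + p
--             else:
--                 t = p
--     if t:
--         nv.append(t)
--     return nv
-- ===== SOURCE B (Python) =====
-- from itertools import groupby
--
-- def fold_multiline(v):
--     return [' '.join(g) for k, g in groupby(v, key=bool) if k]
-- ===== Notes on version B (the rewrite author's own statement) =====
-- stated objective: idiomatic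
-- what changed: Replaces the manual accumulator/flush state machine with an itertools.groupby partition into truthy/falsy runs, joining each truthy run with ' '.
import Mathlib
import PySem

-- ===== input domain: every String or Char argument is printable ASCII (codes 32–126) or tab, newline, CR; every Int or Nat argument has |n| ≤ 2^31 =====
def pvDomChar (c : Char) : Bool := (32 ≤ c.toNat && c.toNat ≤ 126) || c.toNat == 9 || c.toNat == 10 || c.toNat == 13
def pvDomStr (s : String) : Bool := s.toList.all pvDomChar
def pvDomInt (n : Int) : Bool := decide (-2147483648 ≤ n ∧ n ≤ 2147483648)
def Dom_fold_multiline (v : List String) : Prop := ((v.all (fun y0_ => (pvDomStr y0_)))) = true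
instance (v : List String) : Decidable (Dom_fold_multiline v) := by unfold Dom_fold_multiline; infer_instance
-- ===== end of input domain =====

-- B replaces A's manual accumulator/flush state machine with a groupby-style
-- partition into maximal nonblank runs, each joined with ' ' (idiomatic; same cost).


-- ===== PORT A =====
-- the loop body of A (state = (nv, t)); 'not p' on a string is 'p = ""'
def stepA (acc : List String × String) (p : String) : List String × String :=
  if p = "" then
    if acc.2 ≠ "" then (acc.1 ++ [acc.2], "") else (acc.1, acc.2)
  else
    if acc.2 ≠ "" then (acc.1, acc.2 ++ " " ++ p) else (acc.1, p)

-- literal transliteration of A: fold over v with state (nv, t), final flush of t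
def fold_multiline (v : List String) : List String :=
  let st := v.foldl stepA ([], "")
  if st.2 ≠ "" then st.1 ++ [st.2] else st.1

-- ===== PORT B =====
-- ' '.join  (exact for a list of strings)
def joinSpace : List String → String
  | [] => ""
  | [x] => x
  | x :: xs => x ++ " " ++ joinSpace xs

-- groupby(v, key=bool): skip falsy runs, join each maximal truthy run
def fold_multiline_alt : List String → List String
  | [] => []
  | p :: rest =>
    if p = "" then fold_multiline_alt rest
    else joinSpace (p :: rest.takeWhile (· ≠ "")) ::
         fold_multiline_alt (rest.dropWhile (· ≠ ""))
termination_by v => v.length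
decreasing_by
  · simp
  · simp only [List.length_cons]
    exact Nat.lt_succ_of_le (List.length_dropWhile_le _ _)

-- ===== PRECONDITION & SPEC =====
def Spec_fold_multiline (v : List String) (out : List String) : Prop := out = fold_multiline_alt v
instance (v : List String) (out : List String) : Decidable (Spec_fold_multiline v out) := by unfold Spec_fold_multiline; infer_instance

-- ===== CLAIM (what is proved, stated in full; the proofs are below) =====
def Claim_equal_fold_multiline : Prop := ∀ (v : List String), Dom_fold_multiline v → Spec_fold_multiline v (fold_multiline v)

-- ===== LEMMAS AND PROOFS =====

-- A's behaviour when a nonblank accumulator t is pending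
def pend (t : String) : List String → List String
  | [] => [t]
  | p :: vs => if p = "" then t :: fold_multiline_alt vs else pend (t ++ " " ++ p) vs

theorem joinSpace_cons_cons (a b : String) (l : List String) :
    joinSpace (a :: b :: l) = a ++ " " ++ joinSpace (b :: l) := rfl

theorem joinSpace_cons_append (a b : String) (l : List String) :
    joinSpace ((a ++ " " ++ b) :: l) = a ++ " " ++ joinSpace (b :: l) := by
  cases l with
  | nil => rfl
  | cons x xs => simp [joinSpace_cons_cons, String.append_assoc]

theorem pend_eq (vs : List String) : ∀ t : String,
    pend t vs = joinSpace (t :: vs.takeWhile (· ≠ "")) ::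
      fold_multiline_alt (vs.dropWhile (· ≠ "")) := by
  induction vs with
  | nil => intro t; simp [pend, joinSpace, fold_multiline_alt]
  | cons p vs ih =>
    intro t
    by_cases hp : p = ""
    · subst hp
      simp [pend, List.takeWhile, List.dropWhile, joinSpace, fold_multiline_alt]
    · simp [pend, hp, List.takeWhile, List.dropWhile, ih,
        joinSpace_cons_append, joinSpace_cons_cons]

theorem alt_cons_ne (p : String) (vs : List String) (hp : p ≠ "") :
    fold_multiline_alt (p :: vs) =
      joinSpace (p :: vs.takeWhile (· ≠ "")) ::
        fold_multiline_alt (vs.dropWhile (· ≠ "")) := by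
  rw [fold_multiline_alt]
  simp [hp]

def finishA (st : List String × String) : List String :=
  if st.2 ≠ "" then st.1 ++ [st.2] else st.1

theorem loop_eq (v : List String) : ∀ (nv : List String) (t : String),
    finishA (v.foldl stepA (nv, t))
    = nv ++ (if t = "" then fold_multiline_alt v else pend t v) := by
  induction v with
  | nil =>
    intro nv t
    by_cases ht : t = "" <;> simp [finishA, ht, fold_multiline_alt, pend]
  | cons p vs ih =>
    intro nv t
    rw [List.foldl_cons]
    by_cases hp : p = "" <;> by_cases ht : t = ""
    · have h : stepA (nv, t) p = (nv, t) := by simp [stepA, hp, ht]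
      rw [h, ih]
      simp [hp, ht, fold_multiline_alt]
    · have h : stepA (nv, t) p = (nv ++ [t], "") := by simp [stepA, hp, ht]
      rw [h, ih]
      simp [hp, ht, pend]
    · have h : stepA (nv, t) p = (nv, p) := by simp [stepA, hp, ht]
      rw [h, ih]
      simp [hp, ht, pend_eq, alt_cons_ne p vs hp]
    · have h : stepA (nv, t) p = (nv, t ++ " " ++ p) := by
        simp only [stepA]; rw [if_neg hp, if_pos ht]
      rw [h, ih]
      have hne : t ++ " " ++ p ≠ "" := by
        intro h'
        have hl := congrArg String.length h'
        rw [String.length_append, String.length_append] at hl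
        have h1 : (" " : String).length = 1 := rfl
        have h0 : ("" : String).length = 0 := rfl
        rw [h1, h0] at hl
        omega
      simp [hp, ht, hne, pend]

-- ===== VERDICT (by name: the statement is the Claim_ definition above) =====
theorem fold_multiline_spec : Claim_equal_fold_multiline := by
  intro v _
  unfold Spec_fold_multiline fold_multiline
  have := loop_eq v [] ""
  simpa [finishA] using this
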